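-- pv_equiv track=rewrite | github.com/lee14916/glwc3 | project/NST_f_groupProjection/Projectors-master_up1temp/Functions.py | momenta_2p
-- ===== SOURCE A (Python) =====
-- import math
--
-- def momenta_2p(P_ref,msq1,msq2):
--     P1, P2 = [],[]
--     p1max = math.floor(math.sqrt(msq1))
--     for p1 in range(-p1max,p1max+1):
--         p2max = math.floor(math.sqrt(msq1-p1**2))
--         for p2 in range(-p2max,p2max+1):
--             p3s = math.floor(math.sqrt(msq1-p1**2-p2**2))
--             p3s = [0,] if p3s==0 else [-p3s,p3s]
--             for p3 in p3s:
--                 if p1**2+p2**2+p3**2!=msq1: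
--                     continue
--                 p1_tmp = (p1,p2,p3)
--                 p2_tmp = (P_ref[0]-p1,P_ref[1]-p2,P_ref[2]-p3)
--                 if (p2_tmp[0]**2+p2_tmp[1]**2+p2_tmp[2]**2)==msq2:
--                     P1.append(p1_tmp)
--                     P2.append(p2_tmp)
--     return P1,P2
-- ===== SOURCE B (Python) =====
-- import math
--
-- def momenta_2p(P_ref, msq1, msq2):
--     # Instead of testing |P_ref - p|^2 == msq2 for each candidate p3, note that for
--     # |p|^2 == msq1 the condition is the LINEAR equation 2*P_ref.p == |P_ref|^2 + msq1 - msq2,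
--     # so p3 is solved for directly from p1 and p2 (no inner p3 scan, no square-root test
--     # except in the degenerate P_ref[2] == 0 case).
--     Q0, Q1, Q2 = P_ref[0], P_ref[1], P_ref[2]
--     twoc = Q0 * Q0 + Q1 * Q1 + Q2 * Q2 + msq1 - msq2
--     P1, P2 = [], []
--     p1max = math.isqrt(msq1)
--     for p1 in range(-p1max, p1max + 1):
--         r1 = msq1 - p1 * p1
--         e1 = twoc - 2 * Q0 * p1
--         p2max = math.isqrt(r1)
--         for p2 in range(-p2max, p2max + 1):
--             r2 = r1 - p2 * p2
--             e2 = e1 - 2 * Q1 * p2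
--             if Q2 == 0:
--                 if e2 == 0:
--                     s = math.isqrt(r2)
--                     if s * s == r2:
--                         for p3 in ([0] if s == 0 else [-s, s]):
--                             P1.append((p1, p2, p3))
--                             P2.append((Q0 - p1, Q1 - p2, Q2 - p3))
--             else:
--                 if e2 % (2 * Q2) == 0:
--                     p3 = e2 // (2 * Q2)
--                     if p3 * p3 == r2:
--                         P1.append((p1, p2, p3))
--                         P2.append((Q0 - p1, Q1 - p2, Q2 - p3))
--     return P1, P2
-- ===== Notes on version B (the rewrite author's own statement) =====
-- stated objective: faster
-- what changed: B replaces A's inner p3 candidate scan and full quadratic test |P_ref-p|^2==msq2 by the equivalent linear constraint 2*P_ref.p == |P_ref|^2+msq1-msq2, solving for p3 directly from (p1,p2) by one division (square-root tests only survive in the degenerate P_ref[2]==0 case).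
-- outside the precondition, e.g. on momenta_2p([], 7, 0): A returns ([], []), B raises IndexError
import Mathlib
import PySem

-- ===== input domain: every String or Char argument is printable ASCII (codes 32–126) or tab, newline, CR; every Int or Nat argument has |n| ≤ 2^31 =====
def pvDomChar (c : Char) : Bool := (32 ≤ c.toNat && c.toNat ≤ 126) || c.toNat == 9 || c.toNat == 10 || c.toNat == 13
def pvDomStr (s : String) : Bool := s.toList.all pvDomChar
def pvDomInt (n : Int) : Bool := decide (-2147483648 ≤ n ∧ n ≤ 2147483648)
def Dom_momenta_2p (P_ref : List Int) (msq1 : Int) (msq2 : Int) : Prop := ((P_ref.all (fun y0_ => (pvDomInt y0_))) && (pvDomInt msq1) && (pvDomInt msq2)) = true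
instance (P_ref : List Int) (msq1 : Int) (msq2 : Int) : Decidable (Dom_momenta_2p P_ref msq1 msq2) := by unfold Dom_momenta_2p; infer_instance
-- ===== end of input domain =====

-- B replaces A's inner p3 scan + full quadratic test by the equivalent linear constraint
-- 2*P_ref.p = |P_ref|^2 + msq1 - msq2, solving for p3 directly (measured constant-factor speed-up).

-- ===== PORT A =====
-- math.floor(math.sqrt x) is ported as Int.sqrt: exact for 0 ≤ x ≤ 2^31 (double sqrt is
-- correctly rounded there); msq1 < 0 (ValueError) is excluded by Pre_.
def momenta_2p (P_ref : List Int) (msq1 : Int) (msq2 : Int) : List (List Int) × List (List Int) :=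
  let p1max := Int.sqrt msq1
  (PySem.List.pyRange (-p1max) (p1max+1) 1).foldl (fun PP p1 =>
    let p2max := Int.sqrt (msq1 - p1^2)
    (PySem.List.pyRange (-p2max) (p2max+1) 1).foldl (fun PP p2 =>
      let p3s := Int.sqrt (msq1 - p1^2 - p2^2)
      let p3l := if p3s = 0 then [(0:Int)] else [-p3s, p3s]
      p3l.foldl (fun PP p3 =>
        if p1^2 + p2^2 + p3^2 ≠ msq1 then PP
        else
          -- P_ref[0..2]; in range under Pre_ (IndexError outside)
          let q0 := (PySem.List.pyGet? P_ref 0).getD 0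
          let q1 := (PySem.List.pyGet? P_ref 1).getD 0
          let q2 := (PySem.List.pyGet? P_ref 2).getD 0
          let p2t := [q0 - p1, q1 - p2, q2 - p3]
          if (q0-p1)^2 + (q1-p2)^2 + (q2-p3)^2 = msq2 then
            (PP.1 ++ [[p1,p2,p3]], PP.2 ++ [p2t])
          else PP) PP) PP) ([], [])

-- ===== PORT B =====
-- math.isqrt is Int.sqrt; P_ref[0..2] in range under Pre_ (IndexError outside).
def momenta_2p_alt (P_ref : List Int) (msq1 : Int) (msq2 : Int) : List (List Int) × List (List Int) :=
  let Q0 := (PySem.List.pyGet? P_ref 0).getD 0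
  let Q1 := (PySem.List.pyGet? P_ref 1).getD 0
  let Q2 := (PySem.List.pyGet? P_ref 2).getD 0
  let twoc := Q0*Q0 + Q1*Q1 + Q2*Q2 + msq1 - msq2
  let p1max := Int.sqrt msq1
  (PySem.List.pyRange (-p1max) (p1max+1) 1).foldl (fun PP p1 =>
    let r1 := msq1 - p1*p1
    let e1 := twoc - 2*Q0*p1
    let p2max := Int.sqrt r1
    (PySem.List.pyRange (-p2max) (p2max+1) 1).foldl (fun PP p2 =>
      let r2 := r1 - p2*p2
      let e2 := e1 - 2*Q1*p2
      if Q2 = 0 then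
        if e2 = 0 then
          (let s := Int.sqrt r2
           if s*s = r2 then
             (if s = 0 then [(0:Int)] else [-s, s]).foldl
               (fun PP p3 => (PP.1 ++ [[p1,p2,p3]], PP.2 ++ [[Q0-p1, Q1-p2, Q2-p3]])) PP
           else PP)
        else PP
      else
        if PySem.Int.mod e2 (2*Q2) = 0 then
          (let p3 := PySem.Int.floordiv e2 (2*Q2)
           if p3*p3 = r2 then
             (PP.1 ++ [[p1,p2,p3]], PP.2 ++ [[Q0-p1, Q1-p2, Q2-p3]])
           else PP)
        else PP) PP) ([], [])

-- ===== PRECONDITION & SPEC =====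
-- Pre_ excludes msq1 < 0 (A raises ValueError in math.sqrt) and P_ref shorter than 3
-- (B always raises IndexError there, and A raises whenever msq1 is a sum of three squares;
-- where A still returns — no representation exists — B raises, see claim.json cites).
def Pre_momenta_2p (P_ref : List Int) (msq1 : Int) (msq2 : Int) : Prop :=
  0 ≤ msq1 ∧ 3 ≤ P_ref.length
instance (P_ref : List Int) (msq1 : Int) (msq2 : Int) : Decidable (Pre_momenta_2p P_ref msq1 msq2) := by
  unfold Pre_momenta_2p; infer_instance
def pvWitness_momenta_2p : List Int × Int × Int := ([0, 0, 1], 1, 0)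

def Spec_momenta_2p (P_ref : List Int) (msq1 : Int) (msq2 : Int) (out : List (List Int) × List (List Int)) : Prop := out = momenta_2p_alt P_ref msq1 msq2
instance (P_ref : List Int) (msq1 : Int) (msq2 : Int) (out : List (List Int) × List (List Int)) : Decidable (Spec_momenta_2p P_ref msq1 msq2 out) := by unfold Spec_momenta_2p; infer_instance

-- ===== CLAIM (what is proved, stated in full; the proofs are below) =====
def Claim_equal_momenta_2p : Prop := ∀ (P_ref : List Int) (msq1 : Int) (msq2 : Int), Dom_momenta_2p P_ref msq1 msq2 → Pre_momenta_2p P_ref msq1 msq2 → Spec_momenta_2p P_ref msq1 msq2 (momenta_2p P_ref msq1 msq2)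

-- ===== LEMMAS AND PROOFS =====

-- a fold that appends to both components of a pair, as a pair of flatMaps
theorem pvPairFoldlFlat {α β : Type} (l : List α) (F G : α → List β) (acc : List β × List β) :
    l.foldl (fun PP x => (PP.1 ++ F x, PP.2 ++ G x)) acc
      = (acc.1 ++ l.flatMap F, acc.2 ++ l.flatMap G) := by
  induction l generalizing acc with
  | nil => simp
  | cons x xs ih => simp [ih]

-- A's p3 candidate list
def pvCands (s : Int) : List Int := if s = 0 then [0] else [-s, s]

-- A's accepted p3's for a fixed (p1, p2)
def pvSelA (msq1 q0 q1 q2 msq2 p1 p2 : Int) : List Int :=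
  (pvCands (Int.sqrt (msq1 - p1^2 - p2^2))).filter
    (fun p3 => decide (p1^2 + p2^2 + p3^2 = msq1) && decide ((q0-p1)^2 + (q1-p2)^2 + (q2-p3)^2 = msq2))

-- B's accepted p3's for a fixed (p1, p2)
def pvSelB (msq1 q0 q1 q2 msq2 p1 p2 : Int) : List Int :=
  let r2 := msq1 - p1*p1 - p2*p2
  let e2 := (q0*q0 + q1*q1 + q2*q2 + msq1 - msq2) - 2*q0*p1 - 2*q1*p2
  if q2 = 0 then
    if e2 = 0 then
      let s := Int.sqrt r2
      if s*s = r2 then pvCands s else []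
    else []
  else
    if PySem.Int.mod e2 (2*q2) = 0 then
      let p3 := PySem.Int.floordiv e2 (2*q2)
      if p3*p3 = r2 then [p3] else []
    else []

theorem pvPairFoldlMap {α β : Type} (l : List α) (u v : α → β) (acc : List β × List β) :
    List.foldl (fun PP x => (PP.1 ++ [u x], PP.2 ++ [v x])) acc l
      = (acc.1 ++ l.map u, acc.2 ++ l.map v) := by
  induction l generalizing acc with
  | nil => simp
  | cons x xs ih => simp [ih]

theorem pvFoldA (msq1 q0 q1 q2 msq2 p1 p2 : Int) (l : List Int) (acc : List (List Int) × List (List Int)) :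
    List.foldl (fun PP p3 =>
      if p1^2 + p2^2 + p3^2 ≠ msq1 then PP
      else if (q0-p1)^2 + (q1-p2)^2 + (q2-p3)^2 = msq2 then
        (PP.1 ++ [[p1,p2,p3]], PP.2 ++ [[q0 - p1, q1 - p2, q2 - p3]])
      else PP) acc l
      = (acc.1 ++ (List.filter (fun p3 => decide (p1^2 + p2^2 + p3^2 = msq1) && decide ((q0-p1)^2 + (q1-p2)^2 + (q2-p3)^2 = msq2)) l).map (fun p3 => [p1,p2,p3]),
         acc.2 ++ (List.filter (fun p3 => decide (p1^2 + p2^2 + p3^2 = msq1) && decide ((q0-p1)^2 + (q1-p2)^2 + (q2-p3)^2 = msq2)) l).map (fun p3 => [q0 - p1, q1 - p2, q2 - p3])) := by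
  induction l generalizing acc with
  | nil => simp
  | cons x xs ih =>
    rw [List.foldl_cons, ih]
    by_cases h1 : p1^2 + p2^2 + x^2 = msq1 <;>
      by_cases h2 : (q0-p1)^2 + (q1-p2)^2 + (q2-x)^2 = msq2 <;>
      simp [h1, h2]

theorem pvA_flat (P_ref : List Int) (msq1 msq2 : Int) :
    momenta_2p P_ref msq1 msq2 =
      ((PySem.List.pyRange (-(Int.sqrt msq1)) (Int.sqrt msq1 + 1) 1).flatMap (fun p1 =>
        (PySem.List.pyRange (-(Int.sqrt (msq1 - p1^2))) (Int.sqrt (msq1 - p1^2) + 1) 1).flatMap (fun p2 =>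
          (pvSelA msq1 ((PySem.List.pyGet? P_ref 0).getD 0) ((PySem.List.pyGet? P_ref 1).getD 0)
              ((PySem.List.pyGet? P_ref 2).getD 0) msq2 p1 p2).map (fun p3 => [p1, p2, p3]))),
       (PySem.List.pyRange (-(Int.sqrt msq1)) (Int.sqrt msq1 + 1) 1).flatMap (fun p1 =>
        (PySem.List.pyRange (-(Int.sqrt (msq1 - p1^2))) (Int.sqrt (msq1 - p1^2) + 1) 1).flatMap (fun p2 =>
          (pvSelA msq1 ((PySem.List.pyGet? P_ref 0).getD 0) ((PySem.List.pyGet? P_ref 1).getD 0)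
              ((PySem.List.pyGet? P_ref 2).getD 0) msq2 p1 p2).map (fun p3 =>
            [(PySem.List.pyGet? P_ref 0).getD 0 - p1, (PySem.List.pyGet? P_ref 1).getD 0 - p2,
             (PySem.List.pyGet? P_ref 2).getD 0 - p3])))) := by
  unfold momenta_2p
  simp only []
  trans (List.foldl (fun (PP : List (List Int) × List (List Int)) (p1 : Int) =>
      (PP.1 ++ (PySem.List.pyRange (-(Int.sqrt (msq1 - p1^2))) (Int.sqrt (msq1 - p1^2) + 1) 1).flatMap (fun p2 =>
          (pvSelA msq1 ((PySem.List.pyGet? P_ref 0).getD 0) ((PySem.List.pyGet? P_ref 1).getD 0)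
              ((PySem.List.pyGet? P_ref 2).getD 0) msq2 p1 p2).map (fun p3 => [p1, p2, p3])),
       PP.2 ++ (PySem.List.pyRange (-(Int.sqrt (msq1 - p1^2))) (Int.sqrt (msq1 - p1^2) + 1) 1).flatMap (fun p2 =>
          (pvSelA msq1 ((PySem.List.pyGet? P_ref 0).getD 0) ((PySem.List.pyGet? P_ref 1).getD 0)
              ((PySem.List.pyGet? P_ref 2).getD 0) msq2 p1 p2).map (fun p3 =>
            [(PySem.List.pyGet? P_ref 0).getD 0 - p1, (PySem.List.pyGet? P_ref 1).getD 0 - p2,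
             (PySem.List.pyGet? P_ref 2).getD 0 - p3]))))
    ([], []) (PySem.List.pyRange (-(Int.sqrt msq1)) (Int.sqrt msq1 + 1) 1))
  · apply PySem.List.foldl_congr_mem
    intro acc p1 _
    trans (List.foldl (fun (PP : List (List Int) × List (List Int)) (p2 : Int) =>
        (PP.1 ++ (pvSelA msq1 ((PySem.List.pyGet? P_ref 0).getD 0) ((PySem.List.pyGet? P_ref 1).getD 0)
              ((PySem.List.pyGet? P_ref 2).getD 0) msq2 p1 p2).map (fun p3 => [p1, p2, p3]),
         PP.2 ++ (pvSelA msq1 ((PySem.List.pyGet? P_ref 0).getD 0) ((PySem.List.pyGet? P_ref 1).getD 0)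
              ((PySem.List.pyGet? P_ref 2).getD 0) msq2 p1 p2).map (fun p3 =>
            [(PySem.List.pyGet? P_ref 0).getD 0 - p1, (PySem.List.pyGet? P_ref 1).getD 0 - p2,
             (PySem.List.pyGet? P_ref 2).getD 0 - p3])))
      acc (PySem.List.pyRange (-(Int.sqrt (msq1 - p1^2))) (Int.sqrt (msq1 - p1^2) + 1) 1))
    · apply PySem.List.foldl_congr_mem
      intro acc2 p2 _
      simp only [pvSelA, pvCands]
      exact pvFoldA msq1 _ _ _ msq2 p1 p2 _ acc2
    · exact pvPairFoldlFlat _ _ _ acc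
  · rw [pvPairFoldlFlat]
    simp

theorem pvChunkB (msq1 msq2 Q0 Q1 Q2 p1 p2 : Int) (acc : List (List Int) × List (List Int)) :
    (if Q2 = 0 then
       if Q0*Q0 + Q1*Q1 + Q2*Q2 + msq1 - msq2 - 2*Q0*p1 - 2*Q1*p2 = 0 then
         if Int.sqrt (msq1 - p1*p1 - p2*p2) * Int.sqrt (msq1 - p1*p1 - p2*p2) = msq1 - p1*p1 - p2*p2 then
           List.foldl (fun PP p3 => (PP.1 ++ [[p1,p2,p3]], PP.2 ++ [[Q0-p1, Q1-p2, Q2-p3]])) acc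
             (if Int.sqrt (msq1 - p1*p1 - p2*p2) = 0 then [(0:Int)] else [-(Int.sqrt (msq1 - p1*p1 - p2*p2)), Int.sqrt (msq1 - p1*p1 - p2*p2)])
         else acc
       else acc
     else
       if PySem.Int.mod (Q0*Q0 + Q1*Q1 + Q2*Q2 + msq1 - msq2 - 2*Q0*p1 - 2*Q1*p2) (2*Q2) = 0 then
         if PySem.Int.floordiv (Q0*Q0 + Q1*Q1 + Q2*Q2 + msq1 - msq2 - 2*Q0*p1 - 2*Q1*p2) (2*Q2) * PySem.Int.floordiv (Q0*Q0 + Q1*Q1 + Q2*Q2 + msq1 - msq2 - 2*Q0*p1 - 2*Q1*p2) (2*Q2) = msq1 - p1*p1 - p2*p2 then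
           (acc.1 ++ [[p1, p2, PySem.Int.floordiv (Q0*Q0 + Q1*Q1 + Q2*Q2 + msq1 - msq2 - 2*Q0*p1 - 2*Q1*p2) (2*Q2)]],
            acc.2 ++ [[Q0-p1, Q1-p2, Q2 - PySem.Int.floordiv (Q0*Q0 + Q1*Q1 + Q2*Q2 + msq1 - msq2 - 2*Q0*p1 - 2*Q1*p2) (2*Q2)]])
         else acc
       else acc)
    = (acc.1 ++ (pvSelB msq1 Q0 Q1 Q2 msq2 p1 p2).map (fun p3 => [p1,p2,p3]),
       acc.2 ++ (pvSelB msq1 Q0 Q1 Q2 msq2 p1 p2).map (fun p3 => [Q0-p1, Q1-p2, Q2-p3])) := by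
  unfold pvSelB
  simp only []
  split_ifs <;>
    first
      | (rw [pvPairFoldlMap]; simp [pvCands, *])
      | simp [*]

theorem pvB_flat (P_ref : List Int) (msq1 msq2 : Int) :
    momenta_2p_alt P_ref msq1 msq2 =
      ((PySem.List.pyRange (-(Int.sqrt msq1)) (Int.sqrt msq1 + 1) 1).flatMap (fun p1 =>
        (PySem.List.pyRange (-(Int.sqrt (msq1 - p1*p1))) (Int.sqrt (msq1 - p1*p1) + 1) 1).flatMap (fun p2 =>
          (pvSelB msq1 ((PySem.List.pyGet? P_ref 0).getD 0) ((PySem.List.pyGet? P_ref 1).getD 0)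
              ((PySem.List.pyGet? P_ref 2).getD 0) msq2 p1 p2).map (fun p3 => [p1, p2, p3]))),
       (PySem.List.pyRange (-(Int.sqrt msq1)) (Int.sqrt msq1 + 1) 1).flatMap (fun p1 =>
        (PySem.List.pyRange (-(Int.sqrt (msq1 - p1*p1))) (Int.sqrt (msq1 - p1*p1) + 1) 1).flatMap (fun p2 =>
          (pvSelB msq1 ((PySem.List.pyGet? P_ref 0).getD 0) ((PySem.List.pyGet? P_ref 1).getD 0)
              ((PySem.List.pyGet? P_ref 2).getD 0) msq2 p1 p2).map (fun p3 =>
            [(PySem.List.pyGet? P_ref 0).getD 0 - p1, (PySem.List.pyGet? P_ref 1).getD 0 - p2,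
             (PySem.List.pyGet? P_ref 2).getD 0 - p3])))) := by
  unfold momenta_2p_alt
  simp only []
  trans (List.foldl (fun (PP : List (List Int) × List (List Int)) (p1 : Int) =>
      (PP.1 ++ (PySem.List.pyRange (-(Int.sqrt (msq1 - p1*p1))) (Int.sqrt (msq1 - p1*p1) + 1) 1).flatMap (fun p2 => (pvSelB msq1 ((PySem.List.pyGet? P_ref 0).getD 0) ((PySem.List.pyGet? P_ref 1).getD 0) ((PySem.List.pyGet? P_ref 2).getD 0) msq2 p1 p2).map (fun p3 => [p1, p2, p3])),
       PP.2 ++ (PySem.List.pyRange (-(Int.sqrt (msq1 - p1*p1))) (Int.sqrt (msq1 - p1*p1) + 1) 1).flatMap (fun p2 => (pvSelB msq1 ((PySem.List.pyGet? P_ref 0).getD 0) ((PySem.List.pyGet? P_ref 1).getD 0) ((PySem.List.pyGet? P_ref 2).getD 0) msq2 p1 p2).map (fun p3 => [((PySem.List.pyGet? P_ref 0).getD 0) - p1, ((PySem.List.pyGet? P_ref 1).getD 0) - p2, ((PySem.List.pyGet? P_ref 2).getD 0) - p3]))))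
    ([], []) (PySem.List.pyRange (-(Int.sqrt msq1)) (Int.sqrt msq1 + 1) 1))
  · apply PySem.List.foldl_congr_mem
    intro acc p1 _
    trans (List.foldl (fun (PP : List (List Int) × List (List Int)) (p2 : Int) =>
        (PP.1 ++ (pvSelB msq1 ((PySem.List.pyGet? P_ref 0).getD 0) ((PySem.List.pyGet? P_ref 1).getD 0) ((PySem.List.pyGet? P_ref 2).getD 0) msq2 p1 p2).map (fun p3 => [p1, p2, p3]),
         PP.2 ++ (pvSelB msq1 ((PySem.List.pyGet? P_ref 0).getD 0) ((PySem.List.pyGet? P_ref 1).getD 0) ((PySem.List.pyGet? P_ref 2).getD 0) msq2 p1 p2).map (fun p3 => [((PySem.List.pyGet? P_ref 0).getD 0) - p1, ((PySem.List.pyGet? P_ref 1).getD 0) - p2, ((PySem.List.pyGet? P_ref 2).getD 0) - p3])))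
      acc (PySem.List.pyRange (-(Int.sqrt (msq1 - p1*p1))) (Int.sqrt (msq1 - p1*p1) + 1) 1))
    · apply PySem.List.foldl_congr_mem
      intro acc2 p2 _
      exact pvChunkB msq1 msq2 ((PySem.List.pyGet? P_ref 0).getD 0) ((PySem.List.pyGet? P_ref 1).getD 0) ((PySem.List.pyGet? P_ref 2).getD 0) p1 p2 acc2
    · exact pvPairFoldlFlat _ _ _ acc
  · rw [pvPairFoldlFlat]
    simp

theorem pvSel_eq (msq1 q0 q1 q2 msq2 p1 p2 : Int) (hr : 0 ≤ msq1 - p1^2 - p2^2) :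
    pvSelA msq1 q0 q1 q2 msq2 p1 p2 = pvSelB msq1 q0 q1 q2 msq2 p1 p2 := by
  unfold pvSelA pvSelB
  set r2 := msq1 - p1*p1 - p2*p2 with hr2
  have hrw : msq1 - p1^2 - p2^2 = r2 := by rw [hr2]; ring
  rw [hrw]
  set s := Int.sqrt r2 with hs
  set e2 := (q0*q0 + q1*q1 + q2*q2 + msq1 - msq2) - 2*q0*p1 - 2*q1*p2 with he2
  have hr' : 0 ≤ r2 := by rw [hrw] at hr; exact hr
  have habs : ∀ t : Int, t * t = r2 → s = (t.natAbs : Int) := by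
    intro t ht; rw [hs, ← ht, Int.sqrt_eq]
  have hsq_of : ∀ t : Int, t * t = r2 → s * s = r2 := by
    intro t ht; rw [habs t ht, Int.natAbs_mul_self']; exact ht
  have hpm : ∀ t : Int, t * t = r2 → t = s ∨ t = -s := by
    intro t ht
    have h := habs t ht
    rcases Int.natAbs_eq t with h1 | h1
    · left; omega
    · right; omega
  have hzero : s = 0 → r2 = 0 := by
    intro h0
    rw [hs] at h0
    unfold Int.sqrt at h0
    have h1 : r2.toNat.sqrt = 0 := by exact_mod_cast h0
    have h2 := Nat.sqrt_eq_zero.mp h1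
    omega
  have hkey : ∀ t : Int, p1^2 + p2^2 + t^2 = msq1 →
      (((q0-p1)^2 + (q1-p2)^2 + (q2-t)^2 = msq2) ↔ 2*q2*t = e2) := by
    intro t ht
    have hx : (q0-p1)^2 + (q1-p2)^2 + (q2-t)^2
        = (q0*q0 + q1*q1 + q2*q2) + (p1^2 + p2^2 + t^2) - 2*q0*p1 - 2*q1*p2 - 2*q2*t := by ring
    rw [hx, ht, he2]
    constructor <;> intro h <;> linarith
  have hfilter : ∀ t : Int,
      (decide (p1^2 + p2^2 + t^2 = msq1) && decide ((q0-p1)^2 + (q1-p2)^2 + (q2-t)^2 = msq2))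
        = (decide (t*t = r2) && decide (2*q2*t = e2)) := by
    intro t
    have h1 : (p1^2 + p2^2 + t^2 = msq1) ↔ t*t = r2 := by
      have e1 : p1^2 = p1*p1 := pow_two p1
      have e2' : p2^2 = p2*p2 := pow_two p2
      have e3 : t^2 = t*t := pow_two t
      constructor <;> intro h <;> linarith
    by_cases hA : p1^2 + p2^2 + t^2 = msq1
    · have hB := h1.mp hA
      by_cases hC : 2*q2*t = e2
      · simp [hA, hB, hC, (hkey t hA).mpr hC]
      · have : ¬ ((q0-p1)^2 + (q1-p2)^2 + (q2-t)^2 = msq2) := fun h => hC ((hkey t hA).mp h)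
        simp [hA, hB, hC, this]
    · have hB : ¬ t*t = r2 := fun h => hA (h1.mpr h)
      simp [hA, hB]
  rw [List.filter_congr (fun t _ => hfilter t)]
  by_cases hq : q2 = 0
  · rw [if_pos hq, ← hs]
    by_cases hez : e2 = 0
    · by_cases hss : s*s = r2
      · rw [if_pos hez, if_pos hss]
        apply List.filter_eq_self.mpr
        intro t htm
        have ht2 : t*t = r2 := by
          unfold pvCands at htm
          by_cases h0 : s = 0
          · rw [if_pos h0] at htm
            simp at htm
            rw [htm]
            rw [h0] at hss; linarith
          · rw [if_neg h0] at htm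
            simp at htm
            rcases htm with rfl | rfl
            · calc (-s) * (-s) = s * s := by ring
                _ = r2 := hss
            · exact hss
        have hlin : 2*q2*t = e2 := by rw [hq, hez]; ring
        simp [ht2, hlin]
      · rw [if_pos hez, if_neg hss]
        apply List.filter_eq_nil_iff.mpr
        intro t _
        simp only [Bool.and_eq_true, decide_eq_true_eq, not_and]
        intro h1 _
        exact hss (hsq_of t h1)
    · rw [if_neg hez]
      apply List.filter_eq_nil_iff.mpr
      intro t _
      simp only [Bool.and_eq_true, decide_eq_true_eq, not_and]
      intro _ h2
      rw [hq] at h2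
      apply hez; linarith
  · have h2q : (2*q2) ≠ 0 := by omega
    rw [if_neg hq]
    by_cases hmod : PySem.Int.mod e2 (2*q2) = 0
    · have hdvd : (2*q2) ∣ e2 := (PySem.Int.mod_eq_zero_iff_dvd e2 (2*q2)).mp hmod
      rw [if_pos hmod]
      simp only []
      set p3 := PySem.Int.floordiv e2 (2*q2) with hp3
      have hstar : 2*q2*p3 = e2 := by
        obtain ⟨k, hk⟩ := hdvd
        rw [hp3, hk]
        unfold PySem.Int.floordiv
        rw [Int.mul_fdiv_cancel_left _ h2q]
      have huniq : ∀ t : Int, 2*q2*t = e2 ↔ t = p3 := by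
        intro t
        constructor
        · intro h
          have h' : 2*q2*t = 2*q2*p3 := by rw [h, hstar]
          exact mul_left_cancel₀ h2q h'
        · rintro rfl; exact hstar
      by_cases hpp : p3*p3 = r2
      · rw [if_pos hpp]
        have hss : s*s = r2 := hsq_of p3 hpp
        by_cases h0 : s = 0
        · have hp30 : p3 = 0 := by
            rcases hpm p3 hpp with h | h <;> omega
          have hr0 : r2 = 0 := hzero h0
          have he0 : e2 = 0 := by rw [← hstar, hp30]; ring
          rw [hp30]
          simp [pvCands, h0, hr0, he0]
        · rcases hpm p3 hpp with hps | hps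
          · -- p3 = s
            have hy : 2*q2*s = e2 := by rw [← hps]; exact hstar
            have hn : ¬ (-(2*q2*s) = e2) := by
              intro h
              have h' := (huniq (-s)).mp (by linarith)
              omega
            have hd0 : decide ((-s)*(-s) = r2) = true := decide_eq_true (by rw [neg_mul_neg]; exact hss)
            have hd3 : decide (s*s = r2) = true := decide_eq_true hss
            have hd1 : decide (2*q2*s = e2) = true := decide_eq_true hy
            have hd2 : decide (2*q2*(-s) = e2) = false := decide_eq_false (by intro h; exact hn (by linarith))
            have hd2' : decide (-(2*q2*s) = e2) = false := decide_eq_false hn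
            simp [pvCands, h0, List.filter, hd3, hd1, hd2', hps]
          · -- p3 = -s
            have hy : -(2*q2*s) = e2 := by
              have : 2*q2*(-s) = e2 := by rw [← hps] at *; exact hstar
              linarith
            have hn : ¬ (2*q2*s = e2) := by
              intro h
              have h' := (huniq s).mp h
              omega
            have hd0 : decide ((-s)*(-s) = r2) = true := decide_eq_true (by rw [neg_mul_neg]; exact hss)
            have hd3 : decide (s*s = r2) = true := decide_eq_true hss
            have hd1 : decide (2*q2*(-s) = e2) = true := decide_eq_true (by linarith)
            have hd2 : decide (2*q2*s = e2) = false := decide_eq_false hn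
            have hd1' : decide (-(2*q2*s) = e2) = true := decide_eq_true hy
            simp [pvCands, h0, List.filter, hd3, hd2, hd1', hps]
      · rw [if_neg hpp]
        apply List.filter_eq_nil_iff.mpr
        intro t _
        simp only [Bool.and_eq_true, decide_eq_true_eq, not_and]
        intro h1 h2
        have := (huniq t).mp h2
        rw [this] at h1
        exact hpp h1
    · rw [if_neg hmod]
      apply List.filter_eq_nil_iff.mpr
      intro t _
      simp only [Bool.and_eq_true, decide_eq_true_eq, not_and]
      intro _ h2
      apply hmod
      exact (PySem.Int.mod_eq_zero_iff_dvd e2 (2*q2)).mpr ⟨t, h2.symm⟩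

theorem pvSqrt_mul_self_le (m : Int) (hm : 0 ≤ m) : Int.sqrt m * Int.sqrt m ≤ m := by
  have h := Nat.sqrt_le' m.toNat
  unfold Int.sqrt
  have h2 : ((m.toNat.sqrt : Int)) * (m.toNat.sqrt : Int) = ((m.toNat.sqrt ^ 2 : Nat) : Int) := by
    push_cast; ring
  rw [h2]
  omega

theorem pvSq_le_of_range (m x : Int) (hm : 0 ≤ m) (h1 : -(Int.sqrt m) ≤ x) (h2 : x < Int.sqrt m + 1) :
    x^2 ≤ m := by
  have hs := pvSqrt_mul_self_le m hm
  nlinarith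

-- ===== VERDICT (by name: the statement is the Claim_ definition above) =====
theorem momenta_2p_spec : Claim_equal_momenta_2p := by
  intro P_ref msq1 msq2 _hDom hPre
  unfold Spec_momenta_2p
  obtain ⟨hm, _⟩ := hPre
  rw [pvA_flat, pvB_flat]
  have hrange : ∀ p1 : Int, Int.sqrt (msq1 - p1*p1) = Int.sqrt (msq1 - p1^2) := by
    intro p1; congr 1; ring
  have hmain : ∀ p1 ∈ PySem.List.pyRange (-(Int.sqrt msq1)) (Int.sqrt msq1 + 1) 1,
      ∀ p2 ∈ PySem.List.pyRange (-(Int.sqrt (msq1 - p1^2))) (Int.sqrt (msq1 - p1^2) + 1) 1,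
      pvSelA msq1 ((PySem.List.pyGet? P_ref 0).getD 0) ((PySem.List.pyGet? P_ref 1).getD 0)
          ((PySem.List.pyGet? P_ref 2).getD 0) msq2 p1 p2
        = pvSelB msq1 ((PySem.List.pyGet? P_ref 0).getD 0) ((PySem.List.pyGet? P_ref 1).getD 0)
          ((PySem.List.pyGet? P_ref 2).getD 0) msq2 p1 p2 := by
    intro p1 hp1 p2 hp2
    rw [PySem.List.mem_pyRange_one] at hp1 hp2
    have h1 : p1^2 ≤ msq1 := pvSq_le_of_range msq1 p1 hm hp1.1 hp1.2
    have h2 : p2^2 ≤ msq1 - p1^2 := pvSq_le_of_range _ p2 (by omega) hp2.1 hp2.2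
    exact pvSel_eq msq1 _ _ _ msq2 p1 p2 (by omega)
  refine Prod.ext ?_ ?_ <;>
  · simp only []
    refine List.flatMap_congr (fun p1 hp1 => ?_)
    rw [hrange]
    refine List.flatMap_congr (fun p2 hp2 => ?_)
    rw [hmain p1 hp1 p2 hp2]
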